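-- pv_equiv track=rewrite | github.com/guilhermetakeshi/codewars | codewars kyu7/remover o menor valor.py | remove_smallest
-- ===== SOURCE A (Python) =====
-- def remove_smallest(numbers):
--     bigger = min(numbers)
--     smallest = max(numbers)
--
--     for number in numbers:
--         if number < smallest:
--             smallest = number
--
--     first_occurrence = numbers.index(smallest)
--     numbers.pop(first_occurrence)
--
--     return numbers
-- ===== SOURCE B (Python) =====
-- def remove_smallest(numbers):
--     # Right-to-left scan over suffix minima: with '<=', the last index that
--     # improves is the FIRST occurrence of the global minimum.
--     m = numbers[-1]
--     idx = 0
--     for i in range(len(numbers) - 1, -1, -1):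
--         if numbers[i] <= m:
--             m, idx = numbers[i], i
--     numbers.pop(idx)
--     return numbers
-- ===== Notes on version B (the rewrite author's own statement) =====
-- stated objective: alternative
-- what changed: A makes four left-to-right passes (min, max seed, an explicit min loop, then list.index to relocate the value) before popping; B makes a single right-to-left pass maintaining the suffix minimum with '<=' so the last improving index is directly the first occurrence of the global minimum, then pops it - no min/max/index builtins at all.
import Mathlib
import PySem

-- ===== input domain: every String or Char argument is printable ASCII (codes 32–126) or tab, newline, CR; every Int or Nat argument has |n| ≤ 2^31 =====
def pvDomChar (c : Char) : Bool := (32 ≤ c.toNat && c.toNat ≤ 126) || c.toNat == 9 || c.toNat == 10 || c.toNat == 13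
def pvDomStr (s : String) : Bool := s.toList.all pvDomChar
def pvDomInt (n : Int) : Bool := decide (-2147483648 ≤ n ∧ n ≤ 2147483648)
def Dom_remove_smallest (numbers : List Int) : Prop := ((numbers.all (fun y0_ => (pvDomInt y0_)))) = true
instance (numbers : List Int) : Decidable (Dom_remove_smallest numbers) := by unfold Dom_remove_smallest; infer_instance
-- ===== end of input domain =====

-- B replaces A's four left-to-right passes (min, max seed, explicit min loop, list.index)
-- by ONE right-to-left pass keeping the suffix minimum with '<=', whose last improving index
-- is the first occurrence of the global minimum; objective: alternative (same O(n) cost).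
-- Both Pythons mutate their argument in place; the equivalence proved here is about the return value.

-- ===== PORT A =====
def remove_smallest (numbers : List Int) : List Int :=
  match PySem.List.min? numbers (fun y => y), PySem.List.max? numbers (fun y => y) with
  | some _bigger, some m0 =>
    -- smallest = max(numbers); for number in numbers: if number < smallest: smallest = number
    let smallest := numbers.foldl (fun s n => if n < s then n else s) m0
    match PySem.List.index? numbers smallest with
    | some i =>
      match PySem.List.pop? numbers (i : Int) with
      | some r => r.2
      | none => numbers          -- unreachable: index from .index is in range
    | none => numbers            -- unreachable: smallest ∈ numbers
  | _, _ => []                   -- min([]) raises ValueError: excluded by Pre_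

-- ===== PORT B =====
def remove_smallest_alt (numbers : List Int) : List Int :=
  match PySem.List.pyGet? numbers (-1) with
  | none => []                   -- numbers[-1] raises IndexError on []: excluded by Pre_
  | some m0 =>
    -- for i in range(len(numbers)-1, -1, -1): if numbers[i] <= m: m, idx = numbers[i], i
    let r := (PySem.List.pyRange ((numbers.length : Int) - 1) (-1) (-1)).foldl
      (fun (acc : Int × Int) i =>
        match PySem.List.pyGet? numbers i with
        | some v => if v ≤ acc.1 then (v, i) else acc
        | none => acc)           -- unreachable: i in range
      (m0, 0)
    match PySem.List.pop? numbers r.2 with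
    | some p => p.2
    | none => numbers            -- unreachable: idx in range

-- ===== PRECONDITION & SPEC =====
-- Pre_ excludes only the empty list, on which both Pythons raise (ValueError / IndexError).
def Pre_remove_smallest (numbers : List Int) : Prop := numbers ≠ []
instance (numbers : List Int) : Decidable (Pre_remove_smallest numbers) := by
  unfold Pre_remove_smallest; infer_instance
def pvWitness_remove_smallest : List Int := [3, 1, 2, 1]

def Spec_remove_smallest (numbers : List Int) (out : List Int) : Prop := out = remove_smallest_alt numbers
instance (numbers : List Int) (out : List Int) : Decidable (Spec_remove_smallest numbers out) := by unfold Spec_remove_smallest; infer_instance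

-- ===== CLAIM (what is proved, stated in full; the proofs are below) =====
def Claim_equal_remove_smallest : Prop := ∀ (numbers : List Int), Dom_remove_smallest numbers → Pre_remove_smallest numbers → Spec_remove_smallest numbers (remove_smallest numbers)

-- ===== LEMMAS AND PROOFS =====

-- A's update 'if number < smallest then number else smallest' is min.
theorem foldl_step_eq_min (l : List Int) (a : Int) :
    l.foldl (fun s n => if n < s then n else s) a = l.foldl min a := by
  induction l generalizing a with
  | nil => rfl
  | cons n t ih =>
      simp only [List.foldl_cons, ih]
      congr 1
      simp [min_def]; omega

theorem foldl_min_le_init (l : List Int) (a : Int) : l.foldl min a ≤ a := by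
  induction l generalizing a with
  | nil => simp
  | cons n t ih =>
      simpa using le_trans (ih (min a n)) (min_le_left a n)

theorem foldl_min_le_mem (l : List Int) (a b : Int) (hb : b ∈ l) : l.foldl min a ≤ b := by
  induction l generalizing a with
  | nil => cases hb
  | cons n t ih =>
      rcases List.mem_cons.mp hb with rfl | hb'
      · simpa using le_trans (foldl_min_le_init t (min a b)) (min_le_right a b)
      · exact ih (min a n) hb'

theorem foldl_min_min (l : List Int) (a b : Int) :
    l.foldl min (min a b) = min a (l.foldl min b) := by
  induction l generalizing b with
  | nil => simp
  | cons n t ih =>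
      simp only [List.foldl_cons, min_assoc, ih]

theorem foldl_min_mem (l : List Int) (a : Int) : l.foldl min a = a ∨ l.foldl min a ∈ l := by
  induction l generalizing a with
  | nil => simp
  | cons n t ih =>
      rcases ih (min a n) with h | h
      · simp only [List.foldl_cons, h]
        rcases min_cases a n with ⟨h1, _⟩ | ⟨h1, _⟩
        · exact Or.inl h1
        · exact Or.inr (by simp [h1])
      · exact Or.inr (List.mem_cons_of_mem _ (by simpa using h))

-- On a nonempty list A's smallest is the running minimum from the head.
theorem foldl_min_of_mem (x : Int) (xs : List Int) (m0 : Int) (hm : m0 ∈ x :: xs) :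
    (x :: xs).foldl min m0 = xs.foldl min x := by
  have hle : xs.foldl min x ≤ m0 := by
    rcases List.mem_cons.mp hm with rfl | h
    · exact foldl_min_le_init xs m0
    · exact foldl_min_le_mem xs x m0 h
  calc (x :: xs).foldl min m0 = xs.foldl min (min m0 x) := by simp
    _ = min m0 (xs.foldl min x) := foldl_min_min xs m0 x
    _ = min m0 (xs.foldl min x) := rfl
    _ = xs.foldl min x := min_eq_right hle

-- idxOf? of a member is some idxOf.
theorem idxOf?_of_mem (l : List Int) (v : Int) (h : v ∈ l) :
    List.idxOf? v l = some (List.idxOf v l) := by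
  induction l with
  | nil => cases h
  | cons a t ih =>
      by_cases hav : a = v
      · subst hav; simp [List.idxOf?_cons]
      · have hv : v ∈ t := by
          rcases List.mem_cons.mp h with h' | h'
          · exact absurd h'.symm hav
          · exact h'
        simp [List.idxOf?_cons, hav, ih hv]

theorem min_mem_cons (x : Int) (xs : List Int) : xs.foldl min x ∈ x :: xs := by
  rcases foldl_min_mem xs x with h | h
  · simp [h]
  · exact List.mem_cons_of_mem _ h

-- What B's right-to-left scan computes on the suffix starting at off:
-- (first minimum of the suffix and its absolute index) if it improves on the carried m0.
def scanSpec (l : List Int) (off : Nat) (m0 i0 : Int) : Int × Int :=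
  match l with
  | [] => (m0, i0)
  | x :: t =>
      let M := t.foldl min x
      if M ≤ m0 then (M, (off : Int) + (List.idxOf M (x :: t) : Int)) else (m0, i0)

theorem scanSpec_cons (x : Int) (t : List Int) (off : Nat) (m0 i0 : Int) :
    (if x ≤ (scanSpec t (off + 1) m0 i0).1 then (x, (off : Int))
     else scanSpec t (off + 1) m0 i0) = scanSpec (x :: t) off m0 i0 := by
  cases t with
  | nil =>
      simp only [scanSpec, List.foldl_nil]
      split_ifs with h
      · simp
      · rfl
  | cons y u =>
      have hMM : u.foldl min (min x y) = min x (u.foldl min y) := foldl_min_min u x y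
      simp only [scanSpec, List.foldl_cons]
      set M := u.foldl min y with hM
      by_cases hm : M ≤ m0
      · rw [if_pos hm]
        simp only []
        by_cases hx : x ≤ M
        · have h1 : min x M = x := min_eq_left hx
          rw [if_pos hx, hMM, h1, if_pos (le_trans hx hm)]
          simp
        · have h1 : min x M = M := min_eq_right (by omega)
          have hne : x ≠ M := by omega
          rw [if_neg hx, hMM, h1, if_pos hm]
          simp [List.idxOf_cons, hne]
          omega
      · rw [if_neg hm]
        simp only []
        by_cases hx : x ≤ m0
        · have h1 : min x M = x := min_eq_left (by omega)
          rw [if_pos hx, hMM, h1, if_pos hx]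
          simp
        · have h1 : ¬ min x M ≤ m0 := by omega
          rw [if_neg hx, hMM, if_neg h1]

-- The foldr over the ascending index list [off, …, len-1] IS scanSpec of the dropped suffix.
theorem foldr_idx_eq_scanSpec (L : List Int) (off : Nat) (h : off ≤ L.length)
    (m0 i0 : Int) :
    ((List.range (L.length - off)).map (fun j => ((off + j : Nat) : Int))).foldr
      (fun j acc =>
        match PySem.List.pyGet? L j with
        | some v => if v ≤ acc.1 then (v, j) else acc
        | none => acc)
      (m0, i0)
    = scanSpec (L.drop off) off m0 i0 := by
  induction hn : L.length - off generalizing off with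
  | zero =>
      have : off = L.length := by omega
      subst this
      simp [scanSpec]
  | succ n ih =>
      have hofflt : off < L.length := by omega
      rw [List.range_succ_eq_map, List.map_cons, List.foldr_cons, List.map_map]
      have hmapeq : ((List.range n).map ((fun j => ((off + j : Nat) : Int)) ∘ Nat.succ))
          = (List.range n).map (fun j => ((off + 1 + j : Nat) : Int)) := by
        apply List.map_congr_left
        intro j _
        simp [Function.comp]
        omega
      rw [hmapeq, ih (off + 1) (by omega) (by omega)]
      have hget : PySem.List.pyGet? L ((off : Nat) : Int) = some L[off] :=
        PySem.List.pyGet?_ofNat L off hofflt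
      simp only [Nat.add_zero]
      rw [hget]
      have hdrop : L.drop off = L[off] :: L.drop (off + 1) :=
        (List.getElem_cons_drop hofflt).symm
      rw [hdrop, ← scanSpec_cons]

-- B's whole loop returns the global minimum and its first index.
theorem alt_loop_spec (x : Int) (xs : List Int) (m0 : Int) (hm : m0 ∈ x :: xs) :
    (PySem.List.pyRange (((x :: xs).length : Int) - 1) (-1) (-1)).foldl
      (fun (acc : Int × Int) i =>
        match PySem.List.pyGet? (x :: xs) i with
        | some v => if v ≤ acc.1 then (v, i) else acc
        | none => acc)
      (m0, 0)
    = (xs.foldl min x, (List.idxOf (xs.foldl min x) (x :: xs) : Int)) := by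
  set L := x :: xs with hL
  have h1 : PySem.List.pyRange ((L.length : Int) - 1) (-1) (-1)
      = (PySem.List.pyRange 0 (L.length : Int) 1).reverse := by
    have := PySem.List.pyRange_neg_one_eq_reverse ((L.length : Int) - 1) (-1)
    simpa using this
  have h2 : PySem.List.pyRange 0 (L.length : Int) 1
      = (List.range L.length).map (fun j => ((0 + j : Nat) : Int)) := by
    rw [PySem.List.pyRange_zero_natCast]
    simp
  have h3 := foldr_idx_eq_scanSpec L 0 (by omega) m0 0
  simp only [Nat.sub_zero] at h3
  rw [h1, List.foldl_reverse, h2, h3]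
  simp only [List.drop_zero, hL, scanSpec]
  have hle : xs.foldl min x ≤ m0 := by
    rcases List.mem_cons.mp hm with rfl | h
    · exact foldl_min_le_init xs m0
    · exact foldl_min_le_mem xs x m0 h
  rw [if_pos hle]
  simp

-- ===== VERDICT (by name: the statement is the Claim_ definition above) =====
theorem remove_smallest_spec : Claim_equal_remove_smallest := by
  intro numbers _hdom hpre
  unfold Spec_remove_smallest
  match numbers, hpre with
  | x :: xs, _ =>
    unfold remove_smallest remove_smallest_alt
    rw [PySem.List.min?_id_cons, PySem.List.max?_id_cons]
    simp only []
    set M := xs.foldl min x with hMdef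
    have hMmem : M ∈ x :: xs := min_mem_cons x xs
    have hlt : List.idxOf M (x :: xs) < (x :: xs).length := List.idxOf_lt_length_of_mem hMmem
    -- A's side
    have hm0 : xs.foldl max x ∈ x :: xs :=
      PySem.List.max?_mem (PySem.List.max?_id_cons x xs)
    have hsm : (x :: xs).foldl (fun s n => if n < s then n else s) (xs.foldl max x) = M := by
      rw [foldl_step_eq_min, foldl_min_of_mem x xs _ hm0]
    rw [hsm]
    have hidx : PySem.List.index? (x :: xs) M = some (List.idxOf M (x :: xs)) := by
      rw [PySem.List.index?_eq_idxOf?, idxOf?_of_mem _ _ hMmem]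
    rw [hidx]
    simp only []
    rw [PySem.List.pop?_natCast _ _ hlt]
    -- B's side
    have hlast : PySem.List.pyGet? (x :: xs) (-1) = some ((x :: xs).getLast (by simp)) := by
      rw [PySem.List.pyGet?_neg_one, List.getLast?_eq_some_getLast]
    rw [hlast]
    simp only []
    rw [alt_loop_spec x xs _ (List.getLast_mem (by simp)), ← hMdef]
    rw [PySem.List.pop?_natCast _ _ hlt]
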